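-- pv_equiv track=rewrite | github.com/DylanVenomania/School_Files | Hocki1/Laptrinh_Python/Homework/23110186_chuong6/Xulychuoi/Bai9.py | lst_xaucon
-- ===== SOURCE A (Python) =====
-- def lst_xaucon(xaukitu):
--     xaukitu_temp = []
--     max = []
--     for i in range(len(xaukitu)):
--         if xaukitu[i] not in max:
--             max.append(xaukitu[i])
--         else:
--             xaukitu_temp.append(max)
--             max = []
--             max.append(xaukitu[i])
--
--     return xaukitu_temp
-- ===== SOURCE B (Python) =====
-- def lst_xaucon(xaukitu):
--     # Record only the break positions in one scan (set membership), then
--     # materialize every emitted segment by slicing between consecutive breaks;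
--     # the trailing in-progress segment has no following break, so it is never emitted.
--     breaks = [0]
--     seen = set()
--     for i, ch in enumerate(xaukitu):
--         if ch in seen:
--             breaks.append(i)
--             seen = {ch}
--         else:
--             seen.add(ch)
--     return [list(xaukitu[a:b]) for a, b in zip(breaks, breaks[1:])]
-- ===== Notes on version B (the rewrite author's own statement) =====
-- stated objective: alternative
-- what changed: A builds each segment eagerly and commits it inside the break branch of one loop; B records only the break indices in a single scan using a set for the repeat test, then materializes every emitted segment afterwards by slicing the string between consecutive break indices (the trailing segment has no following break, so it is naturally never emitted).
import Mathlib
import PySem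

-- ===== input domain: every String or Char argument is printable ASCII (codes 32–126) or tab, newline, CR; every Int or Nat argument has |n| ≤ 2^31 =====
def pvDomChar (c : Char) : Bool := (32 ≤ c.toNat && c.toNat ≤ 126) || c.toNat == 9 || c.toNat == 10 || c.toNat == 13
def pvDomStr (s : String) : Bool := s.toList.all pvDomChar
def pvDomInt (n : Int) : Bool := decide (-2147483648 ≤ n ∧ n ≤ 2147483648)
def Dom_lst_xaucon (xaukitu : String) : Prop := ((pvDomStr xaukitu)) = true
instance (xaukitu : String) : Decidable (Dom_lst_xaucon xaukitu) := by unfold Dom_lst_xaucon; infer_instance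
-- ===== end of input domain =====

-- B records break indices in one scan and slices the segments out afterwards, instead of
-- A's eager char-by-char segment building with commit-on-break; same return value everywhere.

-- ===== PORT A =====
-- for i in range(len(xaukitu)): xaukitu[i] visits exactly the characters in order;
-- ported as structural recursion over the char list with A's two states (xaukitu_temp, max).
def lst_xauconLoop : List Char → List (List String) → List String → List (List String)
  | [], temp, _mx => temp
  | c :: rest, temp, mx =>
    if String.singleton c ∉ mx then lst_xauconLoop rest temp (mx ++ [String.singleton c])
    else lst_xauconLoop rest (temp ++ [mx]) [String.singleton c]

def lst_xaucon (xaukitu : String) : List (List String) :=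
  lst_xauconLoop xaukitu.toList [] []

-- ===== PORT B =====
-- one scan over enumerate(xaukitu) collecting break indices (set membership test)
def lst_xauconAltLoop : List (Int × Char) → List Int → PySem.Set Char → List Int
  | [], breaks, _seen => breaks
  | (i, c) :: rest, breaks, seen =>
    if PySem.Set.contains seen c then
      lst_xauconAltLoop rest (breaks ++ [i]) (PySem.Set.ofList [c])
    else
      lst_xauconAltLoop rest breaks (PySem.Set.add seen c)

-- breaks[1:] on a list is its tail; list(xaukitu[a:b]) is the sliced chars as 1-char strings
def lst_xaucon_alt (xaukitu : String) : List (List String) :=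
  let cs := xaukitu.toList
  let breaks := lst_xauconAltLoop (PySem.List.enumerate cs) [0] PySem.Set.empty
  (breaks.zip breaks.tail).map (fun p => (PySem.List.slice cs (some p.1) (some p.2)).map (fun c => String.singleton c))

-- ===== PRECONDITION & SPEC =====
def Spec_lst_xaucon (xaukitu : String) (out : List (List String)) : Prop := out = lst_xaucon_alt xaukitu
instance (xaukitu : String) (out : List (List String)) : Decidable (Spec_lst_xaucon xaukitu out) := by unfold Spec_lst_xaucon; infer_instance

-- ===== CLAIM (what is proved, stated in full; the proofs are below) =====
def Claim_equal_lst_xaucon : Prop := ∀ (xaukitu : String), Dom_lst_xaucon xaukitu → Spec_lst_xaucon xaukitu (lst_xaucon xaukitu)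

-- ===== LEMMAS AND PROOFS =====

-- the segment list described by a list of break indices
def pvSegs (cs : List Char) (l : List Int) : List (List String) :=
  (l.zip l.tail).map (fun p => (PySem.List.slice cs (some p.1) (some p.2)).map (fun c => String.singleton c))

theorem pvSingleton_inj {a b : Char} (h : String.singleton a = String.singleton b) : a = b := by
  simpa using congrArg String.toList h

theorem pvMem_map_singleton {c : Char} {l : List Char} :
    String.singleton c ∈ l.map String.singleton ↔ c ∈ l := by
  constructor
  · intro h
    rcases List.mem_map.mp h with ⟨d, hd, he⟩
    exact (pvSingleton_inj he.symm) ▸ hd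
  · intro h; exact List.mem_map_of_mem h

theorem pvZip_tail_append (t : List Int) (b x : Int) :
    ((t ++ [b, x]).zip (t ++ [b, x]).tail) = ((t ++ [b]).zip (t ++ [b]).tail) ++ [(b, x)] := by
  induction t with
  | nil => simp
  | cons a t ih =>
    rcases t with _ | ⟨a', t'⟩
    · simp
    · simpa using ih

theorem pvSegs_append (cs : List Char) (t : List Int) (b x : Int) :
    pvSegs cs (t ++ [b, x]) =
      pvSegs cs (t ++ [b]) ++ [(PySem.List.slice cs (some b) (some x)).map (fun c => String.singleton c)] := by
  unfold pvSegs
  rw [pvZip_tail_append]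
  simp

theorem pvLoop_eq (cs : List Char) :
    ∀ (rest : List Char) (k b : Nat) (bs : List Int) (mch : List Char) (seen : PySem.Set Char),
      cs.drop k = rest →
      b ≤ k →
      mch = (cs.take k).drop b →
      (∀ c, c ∈ seen ↔ c ∈ mch) →
      lst_xauconLoop rest (pvSegs cs (bs ++ [(b : Int)])) (mch.map String.singleton)
        = pvSegs cs (lst_xauconAltLoop (PySem.List.enumerate rest (k : Int)) (bs ++ [(b : Int)]) seen) := by
  intro rest
  induction rest with
  | nil =>
    intro k b bs mch seen _ _ _ _
    simp [lst_xauconLoop, lst_xauconAltLoop, PySem.List.enumerate_nil]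
  | cons c rest ih =>
    intro k b bs mch seen hdrop hbk hmch hseen
    have hklen : k < cs.length := by
      by_contra h
      have : cs.drop k = [] := List.drop_eq_nil_of_le (by omega)
      rw [this] at hdrop; simp at hdrop
    have hget : cs[k]? = some c := by
      rw [← List.head?_drop, hdrop]; rfl
    have htake : cs.take (k + 1) = cs.take k ++ [c] := by
      rw [List.take_add_one, hget]; rfl
    have hdrop' : cs.drop (k + 1) = rest := by
      have : cs.drop (k + 1) = (cs.drop k).drop 1 := by rw [List.drop_drop]
      rw [this, hdrop]; rfl
    have hlen_take : (cs.take k).length = k := by simp; omega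
    rw [PySem.List.enumerate_cons]
    by_cases hc : c ∈ mch
    · -- break: A commits the segment, B records index k
      have hA : ¬ String.singleton c ∉ mch.map String.singleton := by
        simp [pvMem_map_singleton, hc]
      have hB : PySem.Set.contains seen c = true :=
        (PySem.Set.contains_iff seen c).mpr ((hseen c).mpr hc)
      rw [lst_xauconLoop, if_neg hA, lst_xauconAltLoop, if_pos hB]
      have hslice : PySem.List.slice cs (some (b : Int)) (some (k : Int)) = mch := by
        rw [PySem.List.slice_natCast, hmch, List.drop_take]
      have htemp : pvSegs cs (bs ++ [(b : Int)]) ++ [mch.map String.singleton]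
          = pvSegs cs ((bs ++ [(b : Int)]) ++ [(k : Int)]) := by
        have := pvSegs_append cs bs (b : Int) (k : Int)
        rw [List.append_assoc]
        simpa [hslice] using this.symm
      rw [htemp]
      have hcast : (k : Int) + 1 = ((k + 1 : Nat) : Int) := by push_cast; ring
      rw [hcast]
      exact ih (k + 1) k (bs ++ [(b : Int)]) [c] (PySem.Set.ofList [c]) hdrop' (by omega)
        (by rw [htake, List.drop_append_of_le_length (by omega)]
            simp)
        (by intro d; rw [PySem.Set.mem_ofList])
    · -- no break: A appends the char to max, B adds it to seen
      have hA : String.singleton c ∉ mch.map String.singleton := by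
        simp only [pvMem_map_singleton]; exact hc
      have hB : ¬ PySem.Set.contains seen c = true := by
        intro h; exact hc ((hseen c).mp ((PySem.Set.contains_iff seen c).mp h))
      rw [lst_xauconLoop, if_pos hA, lst_xauconAltLoop, if_neg hB]
      have hmap : mch.map String.singleton ++ [String.singleton c] = (mch ++ [c]).map String.singleton := by
        simp
      rw [hmap]
      have hcast : (k : Int) + 1 = ((k + 1 : Nat) : Int) := by push_cast; ring
      rw [hcast]
      exact ih (k + 1) b bs (mch ++ [c]) (PySem.Set.add seen c) hdrop' (by omega)
        (by rw [htake, List.drop_append_of_le_length (by omega), hmch])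
        (by intro d
            rw [PySem.Set.mem_add]
            simp only [List.mem_append, List.mem_singleton, hseen d])

-- ===== VERDICT (by name: the statement is the Claim_ definition above) =====
theorem lst_xaucon_spec : Claim_equal_lst_xaucon := by
  intro x _
  unfold Spec_lst_xaucon lst_xaucon lst_xaucon_alt
  have h := pvLoop_eq x.toList x.toList 0 0 [] [] PySem.Set.empty rfl (le_refl 0) (by simp)
    (by intro c; simp [PySem.Set.empty])
  simpa [pvSegs, PySem.Set.empty] using h
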